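-- pv_equiv track=rewrite | github.com/fu-group/fu | src/lib.py | StringListToText
-- ===== SOURCE A (Python) =====
-- def StringListToText(strlst,header,sep,width,colu,nw):
--     # strlst: ['a','b','c',...], width:element width
--     # example: header='  frgnam(1)='; sep=','; width=-1; colu=5; nw=5
--     text=''
--     blk=' '; eol='\n'
--     nt=len(strlst); nl=nt/nw+1; nh=len(header)
--     ic=-1; k=-1
--     while ic < nt-1:
--         k += 1; hd=header
--         if k > 0: hd=nh*blk
--         line=colu*blk+hd
--         for j in range(nw):
--             ic += 1
--             stri=strlst[ic]; ns=len(stri)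
--             if width > 0:
--                 if ns < width: stri=(width-ns)*blk+stri
--                 elif ns > width: stri=str[:width]
--             if ic >= nt-1:
--                 line=line+stri; break
--             else: line=line+stri+sep
--         text=text+line+eol
--     return text
-- ===== SOURCE B (Python) =====
-- def StringListToText(strlst, header, sep, width, colu, nw):
--     nt = len(strlst)
--     if nt == 0:
--         return ''
--     padded = []
--     for s in strlst:
--         if width > 0:
--             if len(s) < width:
--                 s = (width - len(s)) * ' ' + s
--             elif len(s) > width:
--                 s = s[:width]
--         padded.append(s)
--     first_prefix = colu * ' ' + header
--     rest_prefix = colu * ' ' + len(header) * ' '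
--     text = ''
--     i = 0
--     while i < nt:
--         body = sep.join(padded[i:i + nw])
--         if i + nw < nt:
--             body += sep
--         text += (first_prefix if i == 0 else rest_prefix) + body + '\n'
--         i += nw
--     return text
-- ===== Notes on version B (the rewrite author's own statement) =====
-- stated objective: alternative
-- what changed: B replaces A's fused while-loop state machine (manual element index ic, per-element break, in-loop padding) by two separate passes: one map that pads every element, then a chunk loop over starts i stepping by nw that slices the padded list and joins each chunk with sep.join.
import Mathlib
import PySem

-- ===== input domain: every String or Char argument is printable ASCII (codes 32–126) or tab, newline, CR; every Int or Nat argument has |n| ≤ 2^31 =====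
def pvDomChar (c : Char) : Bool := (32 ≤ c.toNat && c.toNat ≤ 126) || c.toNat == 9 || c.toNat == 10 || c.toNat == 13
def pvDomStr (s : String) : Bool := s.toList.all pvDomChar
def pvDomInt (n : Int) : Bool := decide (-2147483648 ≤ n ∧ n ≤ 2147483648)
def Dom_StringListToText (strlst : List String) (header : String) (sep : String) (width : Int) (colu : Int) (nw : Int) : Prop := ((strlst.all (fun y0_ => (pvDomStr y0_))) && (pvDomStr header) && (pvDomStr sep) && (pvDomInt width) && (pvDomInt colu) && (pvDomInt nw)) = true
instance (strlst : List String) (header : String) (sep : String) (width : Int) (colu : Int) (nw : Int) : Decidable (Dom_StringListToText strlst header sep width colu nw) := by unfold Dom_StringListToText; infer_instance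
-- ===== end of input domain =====

-- B restructures A's fused index/break state machine into pad-all-elements first, then emit chunked
-- lines via slices and sep.join (objective: alternative decomposition; return value only, no mutation).

-- ===== PORT A =====
-- inner `for j in range(nw)` loop of A: threads (ic, line); a `break` returns the pair directly
def pvInnerA (strlst : List String) (sep : String) (width : Int) (nt : Int) :
    Nat → Int → String → Int × String
  | 0, ic, line => (ic, line)
  | j+1, ic, line =>
    let ic := ic + 1
    let stri := PySem.List.pyGetD strlst ic ""   -- in range on every input Pre_ admits
    let ns : Int := PySem.Str.len stri
    let stri :=
      if width > 0 then
        if ns < width then String.ofList (List.replicate (width - ns).toNat ' ') ++ stri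
        else if ns > width then ""   -- Python raises TypeError here (`str[:width]` on the builtin); Pre_ excludes such inputs
        else stri
      else stri
    if ic ≥ nt - 1 then (ic, line ++ stri)
    else pvInnerA strlst sep width nt j ic (line ++ stri ++ sep)

-- outer `while ic < nt-1` loop of A; fuel only makes the loop total (nt+1 suffices whenever nw ≥ 1,
-- i.e. on every input Pre_ admits: each pass consumes at least one element)
def pvOuterA (strlst : List String) (header sep : String) (width colu nw : Int) (nt : Int) :
    Nat → Int → Int → String → String
  | 0, _, _, text => text
  | fuel+1, ic, k, text =>
    if ic < nt - 1 then
      let k := k + 1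
      let hd := if k > 0 then String.ofList (List.replicate (PySem.Str.len header).toNat ' ') else header
      let line := String.ofList (List.replicate colu.toNat ' ') ++ hd
      let r := pvInnerA strlst sep width nt nw.toNat ic line
      pvOuterA strlst header sep width colu nw nt fuel r.1 k (text ++ r.2 ++ "\n")
    else text

-- `nl = nt/nw + 1` of the Python is never used (it raises ZeroDivisionError when nw = 0; Pre_ excludes nw = 0)
def StringListToText (strlst : List String) (header : String) (sep : String) (width : Int) (colu : Int) (nw : Int) : String :=
  pvOuterA strlst header sep width colu nw (strlst.length : Int) (strlst.length + 1) (-1) (-1) ""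

-- ===== PORT B =====
-- padding pass of B (element body of the `for s in strlst` loop)
def pvPadB (width : Int) (s : String) : String :=
  if width > 0 then
    if PySem.Str.len s < width then String.ofList (List.replicate (width - PySem.Str.len s).toNat ' ') ++ s
    else if PySem.Str.len s > width then PySem.Str.slice s none (some width)
    else s
  else s

-- `while i < nt` loop of B; fuel only makes the loop total (nt+1 suffices whenever nw ≥ 1)
def pvEmitB (padded : List String) (firstPrefix restPrefix sep : String) (nt nw : Int) :
    Nat → Int → String → String
  | 0, _, text => text
  | fuel+1, i, text =>
    if i < nt then
      let body := PySem.Str.join sep (PySem.List.slice padded (some i) (some (i + nw)))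
      let body := if i + nw < nt then body ++ sep else body
      pvEmitB padded firstPrefix restPrefix sep nt nw fuel (i + nw)
        (text ++ (if i = 0 then firstPrefix else restPrefix) ++ body ++ "\n")
    else text

def StringListToText_alt (strlst : List String) (header : String) (sep : String) (width : Int) (colu : Int) (nw : Int) : String :=
  if (strlst.length : Int) = 0 then "" else
  let padded := strlst.map (pvPadB width)
  let firstPrefix := String.ofList (List.replicate colu.toNat ' ') ++ header
  let restPrefix := String.ofList (List.replicate colu.toNat ' ') ++ String.ofList (List.replicate (PySem.Str.len header).toNat ' ')
  pvEmitB padded firstPrefix restPrefix sep (strlst.length : Int) nw (strlst.length + 1) 0 ""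

-- ===== PRECONDITION & SPEC =====
-- Pre_ excludes exactly the inputs where A does not return: nw = 0 (ZeroDivisionError at `nt/nw`),
-- nw < 0 with a nonempty list (the while loop never advances), and any element longer than a
-- positive width (`str[:width]` raises TypeError); A returns on every other input.
def Pre_StringListToText (strlst : List String) (header : String) (sep : String) (width : Int) (colu : Int) (nw : Int) : Prop :=
  (1 ≤ nw ∨ (strlst = [] ∧ nw ≠ 0)) ∧ ∀ s ∈ strlst, ¬(0 < width ∧ width < PySem.Str.len s)
instance (strlst : List String) (header : String) (sep : String) (width : Int) (colu : Int) (nw : Int) : Decidable (Pre_StringListToText strlst header sep width colu nw) := by unfold Pre_StringListToText; infer_instance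

def pvWitness_StringListToText : List String × String × String × Int × Int × Int :=
  (["ab", "c", "de"], "h=", ", ", 3, 2, 2)

def Spec_StringListToText (strlst : List String) (header : String) (sep : String) (width : Int) (colu : Int) (nw : Int) (out : String) : Prop := out = StringListToText_alt strlst header sep width colu nw
instance (strlst : List String) (header : String) (sep : String) (width : Int) (colu : Int) (nw : Int) (out : String) : Decidable (Spec_StringListToText strlst header sep width colu nw out) := by unfold Spec_StringListToText; infer_instance

-- ===== CLAIM (what is proved, stated in full; the proofs are below) =====
def Claim_equal_StringListToText : Prop := ∀ (strlst : List String) (header : String) (sep : String) (width : Int) (colu : Int) (nw : Int), Dom_StringListToText strlst header sep width colu nw → Pre_StringListToText strlst header sep width colu nw → Spec_StringListToText strlst header sep width colu nw (StringListToText strlst header sep width colu nw)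

-- ===== LEMMAS AND PROOFS =====

-- string extensionality through toList
lemma pvStrExt {s t : String} (h : s.toList = t.toList) : s = t :=
  String.toList_inj.mp h

-- A's non-final chunk body: every element followed by sep
def pvCat (sep : String) : List String → String
  | [] => ""
  | s :: t => s ++ (sep ++ pvCat sep t)

-- A's final chunk body: sep between elements, none at the end
def pvJoinF (sep : String) : List String → String
  | [] => ""
  | [s] => s
  | s :: x :: t => s ++ (sep ++ pvJoinF sep (x :: t))

lemma pvJoinF_cons (sep s : String) {t : List String} (h : t ≠ []) :
    pvJoinF sep (s :: t) = s ++ (sep ++ pvJoinF sep t) := by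
  cases t with
  | nil => exact absurd rfl h
  | cons x t => rfl

lemma pvJoinF_eq (sep : String) : ∀ l, pvJoinF sep l = PySem.Str.join sep l := by
  intro l
  induction l with
  | nil => apply pvStrExt; simp [pvJoinF, PySem.Str.join, PySem.Chars.join_nil]
  | cons s t ih =>
    cases t with
    | nil => apply pvStrExt; simp [pvJoinF, PySem.Str.join, PySem.Chars.join_singleton]
    | cons x r =>
      apply pvStrExt
      rw [pvJoinF, ih]
      simp [PySem.Str.join, String.toList_append, String.toList_ofList,
        PySem.Chars.join_cons_cons, List.append_assoc]

lemma pvCat_eq (sep : String) : ∀ l, l ≠ [] → pvCat sep l = pvJoinF sep l ++ sep := by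
  intro l
  induction l with
  | nil => intro h; exact absurd rfl h
  | cons s t ih =>
    intro _
    cases t with
    | nil => simp [pvCat, pvJoinF]
    | cons x r =>
      rw [pvCat, ih (by simp), pvJoinF_cons sep s (by simp)]
      simp [String.append_assoc]

-- A's inline padding agrees with B's pvPadB on elements Pre_ admits
lemma pvPad_agree (width : Int) (s : String) (h : ¬(0 < width ∧ width < PySem.Str.len s)) :
    (if width > 0 then
       if PySem.Str.len s < width then String.ofList (List.replicate (width - PySem.Str.len s).toNat ' ') ++ s
       else if PySem.Str.len s > width then ""
       else s
     else s) = pvPadB width s := by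
  unfold pvPadB
  split_ifs with h1 h2 h3 <;> first | rfl | (exfalso; exact h ⟨h1, h3⟩)

-- characterisation of A's inner loop in terms of the padded list
lemma pvInnerA_eq (strlst : List String) (sep : String) (width : Int)
    (hw : ∀ s ∈ strlst, ¬(0 < width ∧ width < PySem.Str.len s)) :
    ∀ (j m : Nat) (line : String), m < strlst.length →
    pvInnerA strlst sep width (strlst.length : Int) j ((m : Int) - 1) line =
      if m + j < strlst.length then
        (((m + j : Nat) : Int) - 1, line ++ pvCat sep (((strlst.map (pvPadB width)).drop m).take j))
      else
        ((strlst.length : Int) - 1, line ++ pvJoinF sep ((strlst.map (pvPadB width)).drop m)) := by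
  intro j
  induction j with
  | zero =>
    intro m line hm
    rw [if_pos (by omega : m + 0 < strlst.length)]
    simp [pvInnerA, pvCat]
  | succ j ih =>
    intro m line hm
    have hmp : m < (strlst.map (pvPadB width)).length := by simpa using hm
    have h1 : ((m : Int) - 1) + 1 = (m : Int) := by ring
    have hget : PySem.List.pyGetD strlst ((m : Int)) "" = strlst[m] := by
      rw [PySem.List.pyGetD_natCast]; exact List.getD_eq_getElem _ _ hm
    have hpad := pvPad_agree width strlst[m] (hw _ (List.getElem_mem hm))
    have hmapm : (strlst.map (pvPadB width))[m] = pvPadB width strlst[m] := List.getElem_map _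
    simp only [pvInnerA, h1, hget, hpad]
    by_cases htop : m + 1 ≥ strlst.length
    · have hmeq : m = strlst.length - 1 := by omega
      rw [if_pos (by omega : (m : Int) ≥ (strlst.length : Int) - 1),
          if_neg (by omega : ¬ m + (j + 1) < strlst.length)]
      rw [Prod.mk.injEq]
      constructor
      · omega
      · rw [List.drop_eq_getElem_cons hmp,
            List.drop_eq_nil_of_le (by simp; omega), hmapm, pvJoinF]
    · have hlt : m + 1 < strlst.length := by omega
      rw [if_neg (by omega : ¬ (m : Int) ≥ (strlst.length : Int) - 1)]
      have h2 : (m : Int) = ((m + 1 : Nat) : Int) - 1 := by push_cast; ring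
      rw [h2, ih (m + 1) (line ++ pvPadB width strlst[m] ++ sep) hlt]
      by_cases hcc : m + (j + 1) < strlst.length
      · rw [if_pos (by omega : (m + 1) + j < strlst.length), if_pos hcc]
        rw [Prod.mk.injEq]
        constructor
        · push_cast; omega
        · rw [List.drop_eq_getElem_cons hmp, List.take_succ_cons, pvCat, hmapm]
          simp [String.append_assoc]
      · rw [if_neg (by omega : ¬ (m + 1) + j < strlst.length), if_neg hcc]
        rw [Prod.mk.injEq]
        refine ⟨rfl, ?_⟩
        have hne : (strlst.map (pvPadB width)).drop (m + 1) ≠ [] := by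
          intro hnil
          have := congrArg List.length hnil
          simp at this
          omega
        rw [List.drop_eq_getElem_cons hmp, pvJoinF_cons sep _ hne, hmapm]
        simp [String.append_assoc]

-- lockstep simulation of A's outer loop by B's emit loop
lemma pvOuter_eq (strlst : List String) (header sep : String) (width colu nw : Int)
    (hw : ∀ s ∈ strlst, ¬(0 < width ∧ width < PySem.Str.len s)) (hnw : 1 ≤ nw) :
    ∀ (fuel : Nat) (m : Nat) (k : Int) (text : String), m ≤ strlst.length →
    (m = 0 ↔ k = -1) → -1 ≤ k →
    pvOuterA strlst header sep width colu nw (strlst.length : Int) fuel ((m : Int) - 1) k text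
    = pvEmitB (strlst.map (pvPadB width))
        (String.ofList (List.replicate colu.toNat ' ') ++ header)
        (String.ofList (List.replicate colu.toNat ' ') ++ String.ofList (List.replicate (PySem.Str.len header).toNat ' '))
        sep (strlst.length : Int) nw fuel (m : Int) text := by
  intro fuel
  induction fuel with
  | zero => intro m k text _ _ _; rfl
  | succ fuel ih =>
    intro m k text hm hk hk1
    have hnwN : ((nw.toNat : Nat) : Int) = nw := Int.toNat_of_nonneg (by omega)
    have hnwN1 : 1 ≤ nw.toNat := by omega
    by_cases hlt : m < strlst.length
    · simp only [pvOuterA, pvEmitB]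
      rw [if_pos (by omega : (m : Int) - 1 < (strlst.length : Int) - 1),
          if_pos (by omega : (m : Int) < (strlst.length : Int))]
      -- the two prefixes coincide
      have hpfx : (String.ofList (List.replicate colu.toNat ' ') ++
            (if k + 1 > 0 then String.ofList (List.replicate (PySem.Str.len header).toNat ' ') else header)) =
          (if (m : Int) = 0 then String.ofList (List.replicate colu.toNat ' ') ++ header
           else String.ofList (List.replicate colu.toNat ' ') ++
             String.ofList (List.replicate (PySem.Str.len header).toNat ' ')) := by
        by_cases hm0 : m = 0
        · have : k = -1 := hk.mp hm0
          subst hm0 this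
          simp
        · have hkne : ¬ k = -1 := fun h => hm0 (hk.mpr h)
          rw [if_pos (by omega : k + 1 > 0), if_neg (by simpa using hm0)]
      rw [hpfx]
      rw [pvInnerA_eq strlst sep width hw nw.toNat m _ hlt]
      have hsl : PySem.List.slice (strlst.map (pvPadB width)) (some ((m : Int))) (some ((m : Int) + nw)) =
          ((strlst.map (pvPadB width)).drop m).take nw.toNat := by
        rw [← hnwN]; exact PySem.List.slice_natCast_add _ _ _
      by_cases hend : m + nw.toNat < strlst.length
      · rw [if_pos hend, if_pos (by omega : (m : Int) + nw < (strlst.length : Int))]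
        have hchne : ((strlst.map (pvPadB width)).drop m).take nw.toNat ≠ [] := by
          intro hnil
          have := congrArg List.length hnil
          simp at this
          omega
        have hbody : PySem.Str.join sep (PySem.List.slice (strlst.map (pvPadB width)) (some ((m : Int))) (some ((m : Int) + nw))) ++ sep =
            pvCat sep (((strlst.map (pvPadB width)).drop m).take nw.toNat) := by
          rw [hsl, ← pvJoinF_eq, ← pvCat_eq _ _ hchne]
        rw [hbody]
        have hadd : (m : Int) + nw = ((m + nw.toNat : Nat) : Int) := by push_cast; omega
        rw [hadd]
        have hih := ih (m + nw.toNat) (k + 1)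
          ((text ++ (if (m : Int) = 0 then String.ofList (List.replicate colu.toNat ' ') ++ header
             else String.ofList (List.replicate colu.toNat ' ') ++
               String.ofList (List.replicate (PySem.Str.len header).toNat ' '))) ++
            pvCat sep (((strlst.map (pvPadB width)).drop m).take nw.toNat) ++ "\n")
          (by omega) (by constructor <;> intro h <;> omega) (by omega)
        have htxt : text ++ ((if (m : Int) = 0 then String.ofList (List.replicate colu.toNat ' ') ++ header
             else String.ofList (List.replicate colu.toNat ' ') ++
               String.ofList (List.replicate (PySem.Str.len header).toNat ' ')) ++
            pvCat sep (((strlst.map (pvPadB width)).drop m).take nw.toNat)) ++ "\n" =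
            (text ++ (if (m : Int) = 0 then String.ofList (List.replicate colu.toNat ' ') ++ header
             else String.ofList (List.replicate colu.toNat ' ') ++
               String.ofList (List.replicate (PySem.Str.len header).toNat ' '))) ++
            pvCat sep (((strlst.map (pvPadB width)).drop m).take nw.toNat) ++ "\n" := by
          simp [String.append_assoc]
        rw [htxt]
        exact hih
      · rw [if_neg hend, if_neg (by omega : ¬ (m : Int) + nw < (strlst.length : Int))]
        have hA : ∀ t : String,
            pvOuterA strlst header sep width colu nw (strlst.length : Int) fuel ((strlst.length : Int) - 1) (k + 1) t = t := by
          intro t; cases fuel <;> simp [pvOuterA]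
        have hB : ∀ t : String,
            pvEmitB (strlst.map (pvPadB width))
              (String.ofList (List.replicate colu.toNat ' ') ++ header)
              (String.ofList (List.replicate colu.toNat ' ') ++ String.ofList (List.replicate (PySem.Str.len header).toNat ' '))
              sep (strlst.length : Int) nw fuel ((m : Int) + nw) t = t := by
          intro t
          cases fuel with
          | zero => rfl
          | succ n => rw [pvEmitB, if_neg (by omega : ¬ (m : Int) + nw < (strlst.length : Int))]
        rw [hA, hB]
        have htake : ((strlst.map (pvPadB width)).drop m).take nw.toNat = (strlst.map (pvPadB width)).drop m := by
          apply List.take_of_length_le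
          simp
          omega
        rw [hsl, htake, ← pvJoinF_eq]
        simp [String.append_assoc]
    · simp only [pvOuterA, pvEmitB]
      rw [if_neg (by omega : ¬ (m : Int) - 1 < (strlst.length : Int) - 1),
          if_neg (by omega : ¬ (m : Int) < (strlst.length : Int))]

-- ===== VERDICT (by name: the statement is the Claim_ definition above) =====
theorem StringListToText_spec : Claim_equal_StringListToText := by
  intro strlst header sep width colu nw _hdom hpre
  unfold Spec_StringListToText StringListToText StringListToText_alt
  obtain ⟨hnw, hw⟩ := hpre
  rcases List.eq_nil_or_concat strlst with hnil | _
  · subst hnil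
    simp [pvOuterA]
  · have hne : strlst ≠ [] := by rintro rfl; simp_all
    have hlen : 0 < strlst.length := List.length_pos_iff.mpr hne
    have hnw1 : 1 ≤ nw := by
      rcases hnw with h | ⟨h, _⟩
      · exact h
      · exact absurd h hne
    have h0 : ¬ ((strlst.length : Int) = 0) := by
      simpa using (by omega : ¬ (strlst.length = 0))
    rw [if_neg h0]
    have := pvOuter_eq strlst header sep width colu nw hw hnw1
      (strlst.length + 1) 0 (-1) "" (by omega) (by simp) (by omega)
    simpa using this
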